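-- pv_equiv track=rewrite | github.com/wilmurillo-ai/Design-Assistant | .skills/openclaw-skills/skills/xixihaha123123123123/wps-docx/scripts/html2docx.py | expand_box_shorthand
-- ===== SOURCE A (Python) =====
-- def expand_box_shorthand(value):
--     """展开 margin/padding 的 1~4 值写法"""
--     parts = [p for p in str(value).split() if p]
--     if not parts:
--         return None
--     if len(parts) == 1:
--         t = r = b = l = parts[0]
--     elif len(parts) == 2:
--         t = b = parts[0]
--         r = l = parts[1]
--     elif len(parts) == 3:
--         t = parts[0]
--         r = l = parts[1]
--         b = parts[2]
--     else:
--         t, r, b, l = parts[:4]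
--     return t, r, b, l
-- ===== SOURCE B (Python) =====
-- def expand_box_shorthand(value):
--     """展开 margin/padding 的 1~4 值写法"""
--     parts = str(value).split()[:4]
--     if not parts:
--         return None
--     while len(parts) < 4:
--         parts.append(parts[max(len(parts) - 2, 0)])
--     return tuple(parts)
-- ===== Notes on version B (the rewrite author's own statement) =====
-- stated objective: alternative
-- what changed: Replaces the four-way if/elif count-based selection with truncation to 4 tokens followed by a growth loop that repeatedly appends parts[max(len(parts)-2,0)], one uniform rule encoding the whole CSS fallback (right<-top, bottom<-top, left<-right).
import Mathlib
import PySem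

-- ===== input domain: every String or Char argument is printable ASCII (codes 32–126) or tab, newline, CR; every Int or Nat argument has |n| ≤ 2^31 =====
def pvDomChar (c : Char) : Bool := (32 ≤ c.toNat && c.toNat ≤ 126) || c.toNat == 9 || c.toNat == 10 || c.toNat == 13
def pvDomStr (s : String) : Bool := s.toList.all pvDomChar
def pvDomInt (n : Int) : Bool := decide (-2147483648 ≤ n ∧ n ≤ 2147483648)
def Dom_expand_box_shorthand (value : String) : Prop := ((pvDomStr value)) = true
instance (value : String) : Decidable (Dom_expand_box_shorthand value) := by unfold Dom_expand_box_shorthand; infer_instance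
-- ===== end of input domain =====

-- B replaces A's four-way if/elif ladder with a growth loop that pads the (truncated)
-- token list to 4 entries by the single rule append parts[max(len-2,0)]; alternative decomposition, same values.


-- ===== PORT A =====
def expand_box_shorthand (value : String) : Option (String × String × String × String) :=
  let parts := (PySem.Str.split₀ value).filter (fun p => p != "")
  if parts.length = 0 then none
  else if parts.length = 1 then
    let t := PySem.List.pyGetD parts 0 ""
    some (t, t, t, t)
  else if parts.length = 2 then
    let t := PySem.List.pyGetD parts 0 ""
    let r := PySem.List.pyGetD parts 1 ""
    some (t, r, t, r)
  else if parts.length = 3 then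
    let t := PySem.List.pyGetD parts 0 ""
    let r := PySem.List.pyGetD parts 1 ""
    let b := PySem.List.pyGetD parts 2 ""
    some (t, r, b, r)
  else
    let t := PySem.List.pyGetD parts 0 ""
    let r := PySem.List.pyGetD parts 1 ""
    let b := PySem.List.pyGetD parts 2 ""
    let l := PySem.List.pyGetD parts 3 ""
    some (t, r, b, l)

-- ===== PORT B =====
-- the while loop of Source B, with fuel (it runs at most 3 times since the list starts non-empty)
def pvGrow : Nat → List String → List String
  | 0, ps => ps
  | n + 1, ps =>
    if ps.length < 4 then
      pvGrow n (ps ++ [PySem.List.pyGetD ps (max ((ps.length : Int) - 2) 0) ""])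
    else ps

def expand_box_shorthand_alt (value : String) : Option (String × String × String × String) :=
  let parts := (PySem.Str.split₀ value).take 4
  if parts = [] then none
  else
    match pvGrow 3 parts with
    | [t, r, b, l] => some (t, r, b, l)
    | _ => none

-- ===== PRECONDITION & SPEC =====
def Spec_expand_box_shorthand (value : String) (out : Option (String × String × String × String)) : Prop := out = expand_box_shorthand_alt value
instance (value : String) (out : Option (String × String × String × String)) : Decidable (Spec_expand_box_shorthand value out) := by unfold Spec_expand_box_shorthand; infer_instance

-- ===== CLAIM (what is proved, stated in full; the proofs are below) =====
def Claim_equal_expand_box_shorthand : Prop := ∀ (value : String), Dom_expand_box_shorthand value → Spec_expand_box_shorthand value (expand_box_shorthand value)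

-- ===== LEMMAS AND PROOFS =====

-- every word produced by str.split() is non-empty (invariant of split₀.go)
theorem pv_go_ne_nil (s cur : List Char) (acc : List (List Char))
    (h : ∀ p ∈ acc, p ≠ []) : ∀ p ∈ PySem.Chars.split₀.go s cur acc, p ≠ [] := by
  induction s generalizing cur acc with
  | nil =>
    simp only [PySem.Chars.split₀.go]
    split_ifs with hc
    · simpa using h
    · intro p hp
      simp only [List.mem_reverse, List.mem_cons] at hp
      rcases hp with hp | hp
      · subst hp; simpa [List.isEmpty_iff] using hc
      · exact h p hp
  | cons c rest ih =>
    simp only [PySem.Chars.split₀.go]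
    split_ifs with hs hc
    · exact ih [] acc h
    · refine ih [] (cur.reverse :: acc) ?_
      intro p hp
      rcases List.mem_cons.mp hp with hp | hp
      · subst hp; simpa [List.isEmpty_iff] using hc
      · exact h p hp
    · exact ih (c :: cur) acc h

theorem pv_split₀_ne_nil (s : List Char) : ∀ p ∈ PySem.Chars.split₀ s, p ≠ [] := by
  exact pv_go_ne_nil s [] [] (by simp)

theorem pv_split₀_str_ne (v : String) : ∀ p ∈ PySem.Str.split₀ v, p ≠ "" := by
  intro p hp
  have h := PySem.Str.split₀_map_toList v
  have hl : p.toList ∈ PySem.Chars.split₀ v.toList := by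
    rw [← h]; exact List.mem_map_of_mem hp
  have := pv_split₀_ne_nil v.toList p.toList hl
  intro hcon
  apply this
  rw [hcon]
  rfl

theorem pv_filter_eq (l : List String) (h : ∀ p ∈ l, p ≠ "") :
    l.filter (fun p => p != "") = l := by
  apply List.filter_eq_self.mpr
  intro p hp
  simpa using h p hp

theorem expand_box_shorthand_spec : Claim_equal_expand_box_shorthand := by
  intro value _
  unfold Spec_expand_box_shorthand expand_box_shorthand expand_box_shorthand_alt
  rw [pv_filter_eq _ (pv_split₀_str_ne value)]
  rcases h : PySem.Str.split₀ value with _ | ⟨a, _ | ⟨b, _ | ⟨c, _ | ⟨d, rest⟩⟩⟩⟩ <;>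
    simp [pvGrow, PySem.List.pyGetD, PySem.List.pyGet?, PySem.List.pyIdx?] <;>
      split_ifs <;> simp_all <;> omega
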